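-- pv_equiv track=rewrite | github.com/AstroPix/analogCollection_scope | analysis/enResFitting.py | getArrayIndex
-- ===== SOURCE A (Python) =====
-- def getArrayIndex(array, low,high):
-- 	goodValues=[]
-- 	for i in range(len(array)):
-- 		if array[i]>low and array[i]<high:
-- 			goodValues.append(i)
--
-- 	low_i=goodValues[0]
-- 	high_i=goodValues[-1]
--
-- 	return low_i, high_i
-- ===== SOURCE B (Python) =====
-- def getArrayIndex(array, low, high):
--     n = len(array)
--     low_i = next(i for i in range(n) if low < array[i] < high)
--     high_i = next(i for i in range(n - 1, -1, -1) if low < array[i] < high)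
--     return low_i, high_i
-- ===== Notes on version B (the rewrite author's own statement) =====
-- stated objective: alternative
-- what changed: Instead of collecting every in-range index into a list and reading its first and last element, B runs two short-circuiting scans (a forward and a backward generator with next) that each stop at the first match, keeping only two scalars.
import Mathlib
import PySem

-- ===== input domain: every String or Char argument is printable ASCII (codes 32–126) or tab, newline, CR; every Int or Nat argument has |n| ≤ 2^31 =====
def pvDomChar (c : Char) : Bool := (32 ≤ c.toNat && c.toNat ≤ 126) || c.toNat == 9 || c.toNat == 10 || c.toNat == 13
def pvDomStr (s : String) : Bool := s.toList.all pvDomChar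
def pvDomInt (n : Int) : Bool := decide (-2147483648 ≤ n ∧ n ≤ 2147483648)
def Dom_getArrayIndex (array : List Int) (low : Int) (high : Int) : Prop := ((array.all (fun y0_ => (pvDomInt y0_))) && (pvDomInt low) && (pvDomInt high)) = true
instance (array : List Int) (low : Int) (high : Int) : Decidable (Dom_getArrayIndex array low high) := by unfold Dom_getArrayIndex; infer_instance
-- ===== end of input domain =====

-- B replaces A's collect-all-indices list with two short-circuiting scans (forward and backward find of the first in-range index); alternative decomposition, same return value on Pre_.


-- ===== PORT A =====
-- goodValues[0] / goodValues[-1] are read with pyGet?; on Pre_ the list is nonempty so both are `some` (getD 0 is never exercised inside Pre_).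
def getArrayIndex (array : List Int) (low : Int) (high : Int) : Int × Int :=
  let goodValues := (PySem.List.pyRange 0 (array.length : Int) 1).foldl
    (fun acc i =>
      if decide (PySem.List.pyGetD array i 0 > low) && decide (PySem.List.pyGetD array i 0 < high)
      then acc ++ [i] else acc) []
  let low_i := (PySem.List.pyGet? goodValues 0).getD 0
  let high_i := (PySem.List.pyGet? goodValues (-1)).getD 0
  (low_i, high_i)

-- ===== PORT B =====
-- next(generator) is ported as List.find? on the same range; on Pre_ both find?s succeed (getD 0 is never exercised inside Pre_).
def getArrayIndex_alt (array : List Int) (low : Int) (high : Int) : Int × Int :=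
  let n : Int := array.length
  let p : Int → Bool := fun i =>
    decide (low < PySem.List.pyGetD array i 0) && decide (PySem.List.pyGetD array i 0 < high)
  let low_i := ((PySem.List.pyRange 0 n 1).find? p).getD 0
  let high_i := ((PySem.List.pyRange (n - 1) (-1) (-1)).find? p).getD 0
  (low_i, high_i)

-- ===== PRECONDITION & SPEC =====
-- Pre_ excludes exactly the inputs with no element strictly between low and high, where A raises IndexError (goodValues[0]).
def Pre_getArrayIndex (array : List Int) (low : Int) (high : Int) : Prop :=
  (array.any (fun x => decide (low < x) && decide (x < high))) = true
instance (array : List Int) (low : Int) (high : Int) : Decidable (Pre_getArrayIndex array low high) := by unfold Pre_getArrayIndex; infer_instance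
def pvWitness_getArrayIndex : List Int × Int × Int := ([5, 1, 3, 7, 2], 0, 4)

def Spec_getArrayIndex (array : List Int) (low : Int) (high : Int) (out : Int × Int) : Prop := out = getArrayIndex_alt array low high
instance (array : List Int) (low : Int) (high : Int) (out : Int × Int) : Decidable (Spec_getArrayIndex array low high out) := by unfold Spec_getArrayIndex; infer_instance

-- ===== CLAIM (what is proved, stated in full; the proofs are below) =====
def Claim_equal_getArrayIndex : Prop := ∀ (array : List Int) (low : Int) (high : Int), Dom_getArrayIndex array low high → Pre_getArrayIndex array low high → Spec_getArrayIndex array low high (getArrayIndex array low high)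

-- ===== LEMMAS AND PROOFS =====

-- find? is the head of filter
theorem pv_find?_eq_head?_filter {α : Type} (p : α → Bool) (l : List α) :
    l.find? p = (l.filter p).head? := by
  induction l with
  | nil => rfl
  | cons x xs ih =>
    by_cases h : p x
    · rw [List.find?_cons_of_pos h, List.filter_cons_of_pos h]; rfl
    · rw [List.find?_cons_of_neg h, List.filter_cons_of_neg h]; exact ih

-- A's accumulated foldl is a filter
theorem pv_goodValues_eq_filter (p : Int → Bool) (l : List Int) :
    l.foldl (fun acc i => if p i then acc ++ [i] else acc) [] = l.filter p := by
  simpa using PySem.List.foldl_append_if p id l []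

theorem pv_pyGet?_zero {α : Type} (l : List α) : PySem.List.pyGet? l 0 = l.head? := by
  cases l <;> simp [PySem.List.pyGet?, PySem.List.pyIdx?]

-- ===== VERDICT (by name: the statement is the Claim_ definition above) =====
theorem getArrayIndex_spec : Claim_equal_getArrayIndex := by
  intro array low high _ _
  unfold Spec_getArrayIndex getArrayIndex getArrayIndex_alt
  simp only []
  set p : Int → Bool := fun i =>
    decide (low < PySem.List.pyGetD array i 0) && decide (PySem.List.pyGetD array i 0 < high) with hp
  have hfold : (PySem.List.pyRange 0 (array.length : Int) 1).foldl
      (fun acc i =>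
        if decide (PySem.List.pyGetD array i 0 > low) && decide (PySem.List.pyGetD array i 0 < high)
        then acc ++ [i] else acc) [] = (PySem.List.pyRange 0 (array.length : Int) 1).filter p := by
    rw [hp]
    exact pv_goodValues_eq_filter _ _
  rw [hfold]
  have hrev : PySem.List.pyRange ((array.length : Int) - 1) (-1) (-1)
      = (PySem.List.pyRange 0 (array.length : Int) 1).reverse := by
    rw [PySem.List.pyRange_neg_one_eq_reverse]
    norm_num
  rw [hrev, pv_find?_eq_head?_filter, pv_find?_eq_head?_filter,
      List.filter_reverse, List.head?_reverse, pv_pyGet?_zero, PySem.List.pyGet?_neg_one]
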